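-- pv_equiv track=rewrite | github.com/IgorLavrentev/survivor | saving_toner.py | PrintingCosts
-- ===== SOURCE A (Python) =====
-- def PrintingCosts(Line):
--     # создание словаря
--     dictionary = {}
--
--     dictionary[' '] = 0; dictionary['!'] = 9; dictionary['"'] = 6; dictionary['#'] = 24; dictionary['$'] = 29; dictionary['%'] = 22;
--     dictionary['&'] = 24; dictionary['\''] = 3; dictionary['('] = 12; dictionary[')'] = 12; dictionary['*'] = 17; dictionary['+'] = 13;
--     dictionary[','] = 7; dictionary['-'] = 7; dictionary['.'] = 4; dictionary['/'] = 10; dictionary['0'] = 22; dictionary['1'] = 19;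
--     dictionary['2'] = 22; dictionary['3'] = 23; dictionary['4'] = 21; dictionary['5'] = 27; dictionary['6'] = 26; dictionary['7'] = 16;
--     dictionary['8'] = 23; dictionary['9'] = 26; dictionary[':'] = 8; dictionary[';'] = 11; dictionary['<'] = 10; dictionary['='] = 14;
--     dictionary['>'] = 10; dictionary['?'] = 15; dictionary['@'] = 32; dictionary['A'] = 24; dictionary['B'] = 29; dictionary['C'] = 20;
--     dictionary['D'] = 26; dictionary['E'] = 26; dictionary['F'] = 20; dictionary['G'] = 25; dictionary['H'] = 25; dictionary['I'] = 18;
--     dictionary['J'] = 18; dictionary['K'] = 21; dictionary['L'] = 16; dictionary['M'] = 28; dictionary['N'] = 25; dictionary['O'] = 18;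
--     dictionary['P'] = 23; dictionary['Q'] = 31; dictionary['R'] = 28; dictionary['S'] = 25; dictionary['T'] = 16; dictionary['U'] = 23;
--     dictionary['V'] = 19; dictionary['W'] = 26; dictionary['X'] = 18; dictionary['Y'] = 14; dictionary['Z'] = 22; dictionary['['] = 18;
--     dictionary['\\'] = 10; dictionary[']'] = 18; dictionary['^'] = 7; dictionary['_'] = 8; dictionary['`'] = 3; dictionary['a'] = 23;
--     dictionary['b'] = 25; dictionary['c'] = 17; dictionary['d'] = 25; dictionary['e'] = 23; dictionary['f'] = 18; dictionary['g'] = 30;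
--     dictionary['h'] = 21; dictionary['i'] = 15; dictionary['j'] = 20; dictionary['k'] = 21; dictionary['l'] = 16; dictionary['m'] = 22;
--     dictionary['n'] = 18; dictionary['o'] = 20; dictionary['p'] = 25; dictionary['q'] = 25; dictionary['r'] = 13; dictionary['s'] = 21;
--     dictionary['t'] = 17; dictionary['u'] = 17; dictionary['v'] = 13; dictionary['w'] = 25; dictionary['x'] = 13; dictionary['y'] = 24;
--     dictionary['z'] = 19; dictionary['{'] = 17; dictionary['|'] = 12; dictionary['}'] = 18; dictionary['~'] = 9;
--
--     counter = len(dictionary)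
--     summ = 0 # переменная для суммы расхода тонера
--     for i in range(len(Line)):
--         for key in dictionary:
--             if Line[i] == key:
--                 summ += dictionary.get(key)
--                 counter -= 1
--         if counter == len(dictionary): # условия для добавления количества тонера для значений вне заданной таблицы
--             summ += 23
--         counter = len(dictionary)
--
--     return summ
-- ===== SOURCE B (Python) =====
-- def PrintingCosts(Line):
--     cost = {
--         ' ': 0, '!': 9, '"': 6, '#': 24, '$': 29, '%': 22,
--         '&': 24, "'": 3, '(': 12, ')': 12, '*': 17, '+': 13,
--         ',': 7, '-': 7, '.': 4, '/': 10, '0': 22, '1': 19,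
--         '2': 22, '3': 23, '4': 21, '5': 27, '6': 26, '7': 16,
--         '8': 23, '9': 26, ':': 8, ';': 11, '<': 10, '=': 14,
--         '>': 10, '?': 15, '@': 32, 'A': 24, 'B': 29, 'C': 20,
--         'D': 26, 'E': 26, 'F': 20, 'G': 25, 'H': 25, 'I': 18,
--         'J': 18, 'K': 21, 'L': 16, 'M': 28, 'N': 25, 'O': 18,
--         'P': 23, 'Q': 31, 'R': 28, 'S': 25, 'T': 16, 'U': 23,
--         'V': 19, 'W': 26, 'X': 18, 'Y': 14, 'Z': 22, '[': 18,
--         '\\': 10, ']': 18, '^': 7, '_': 8, '`': 3, 'a': 23,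
--         'b': 25, 'c': 17, 'd': 25, 'e': 23, 'f': 18, 'g': 30,
--         'h': 21, 'i': 15, 'j': 20, 'k': 21, 'l': 16, 'm': 22,
--         'n': 18, 'o': 20, 'p': 25, 'q': 25, 'r': 13, 's': 21,
--         't': 17, 'u': 17, 'v': 13, 'w': 25, 'x': 13, 'y': 24,
--         'z': 19, '{': 17, '|': 12, '}': 18, '~': 9,
--     }
--     # one-pass frequency table, then weight each distinct character once
--     freq = {}
--     for ch in Line:
--         freq[ch] = freq.get(ch, 0) + 1
--     return sum(n * cost.get(ch, 23) for ch, n in freq.items())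
-- ===== Notes on version B (the rewrite author's own statement) =====
-- stated objective: faster
-- what changed: A scans all 95 dictionary keys for every character of Line; B builds a one-pass character frequency table and weights each distinct character once via dict.get(ch, 23).
import Mathlib
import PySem

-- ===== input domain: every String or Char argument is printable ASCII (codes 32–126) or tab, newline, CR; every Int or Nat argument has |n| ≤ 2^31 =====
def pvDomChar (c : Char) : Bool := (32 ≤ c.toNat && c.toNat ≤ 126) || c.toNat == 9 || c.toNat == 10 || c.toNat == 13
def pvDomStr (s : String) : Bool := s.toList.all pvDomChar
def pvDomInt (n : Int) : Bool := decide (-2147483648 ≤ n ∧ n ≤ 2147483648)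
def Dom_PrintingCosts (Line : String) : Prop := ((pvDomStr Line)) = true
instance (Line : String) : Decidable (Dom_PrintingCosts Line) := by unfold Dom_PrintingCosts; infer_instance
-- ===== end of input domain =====

-- B replaces A's per-character scan over all 95 dict keys by a one-pass frequency table weighted once
-- per distinct character (objective: faster, constant-factor).

-- ===== PORT A =====
-- the dict built by A's 95 assignments, in order
def pvTonerDict : PySem.Dict Char Int :=
  PySem.Dict.empty |>.insert ' ' 0 |>.insert '!' 9 |>.insert '"' 6 |>.insert '#' 24 |>.insert '$' 29 |>.insert '%' 22
    |>.insert '&' 24 |>.insert '\'' 3 |>.insert '(' 12 |>.insert ')' 12 |>.insert '*' 17 |>.insert '+' 13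
    |>.insert ',' 7 |>.insert '-' 7 |>.insert '.' 4 |>.insert '/' 10 |>.insert '0' 22 |>.insert '1' 19
    |>.insert '2' 22 |>.insert '3' 23 |>.insert '4' 21 |>.insert '5' 27 |>.insert '6' 26 |>.insert '7' 16
    |>.insert '8' 23 |>.insert '9' 26 |>.insert ':' 8 |>.insert ';' 11 |>.insert '<' 10 |>.insert '=' 14
    |>.insert '>' 10 |>.insert '?' 15 |>.insert '@' 32 |>.insert 'A' 24 |>.insert 'B' 29 |>.insert 'C' 20
    |>.insert 'D' 26 |>.insert 'E' 26 |>.insert 'F' 20 |>.insert 'G' 25 |>.insert 'H' 25 |>.insert 'I' 18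
    |>.insert 'J' 18 |>.insert 'K' 21 |>.insert 'L' 16 |>.insert 'M' 28 |>.insert 'N' 25 |>.insert 'O' 18
    |>.insert 'P' 23 |>.insert 'Q' 31 |>.insert 'R' 28 |>.insert 'S' 25 |>.insert 'T' 16 |>.insert 'U' 23
    |>.insert 'V' 19 |>.insert 'W' 26 |>.insert 'X' 18 |>.insert 'Y' 14 |>.insert 'Z' 22 |>.insert '[' 18
    |>.insert '\\' 10 |>.insert ']' 18 |>.insert '^' 7 |>.insert '_' 8 |>.insert '`' 3 |>.insert 'a' 23
    |>.insert 'b' 25 |>.insert 'c' 17 |>.insert 'd' 25 |>.insert 'e' 23 |>.insert 'f' 18 |>.insert 'g' 30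
    |>.insert 'h' 21 |>.insert 'i' 15 |>.insert 'j' 20 |>.insert 'k' 21 |>.insert 'l' 16 |>.insert 'm' 22
    |>.insert 'n' 18 |>.insert 'o' 20 |>.insert 'p' 25 |>.insert 'q' 25 |>.insert 'r' 13 |>.insert 's' 21
    |>.insert 't' 17 |>.insert 'u' 17 |>.insert 'v' 13 |>.insert 'w' 25 |>.insert 'x' 13 |>.insert 'y' 24
    |>.insert 'z' 19 |>.insert '{' 17 |>.insert '|' 12 |>.insert '}' 18 |>.insert '~' 9

-- the body of A's outer loop, applied to the current (summ, counter) state and the character Line[i]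
def pvStepA (acc : Int × Int) (ch : Char) : Int × Int :=
  let inner := pvTonerDict.items.foldl
    (fun (a : Int × Int) kv =>
      if ch == kv.1 then (a.1 + (pvTonerDict.get? kv.1).getD 0, a.2 - 1) else a) acc
  let summ := if inner.2 == (pvTonerDict.size : Int) then inner.1 + 23 else inner.1
  (summ, (pvTonerDict.size : Int))

def PrintingCosts (Line : String) : Int :=
  -- Line[i] is in range for every i of range(len(Line)), so the pyGetD default is never used
  ((PySem.List.pyRange 0 (PySem.Str.len Line)).foldl
    (fun acc i => pvStepA acc (PySem.List.pyGetD Line.toList i ' '))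
    (0, (pvTonerDict.size : Int))).1

-- ===== PORT B =====
-- B's cost table, a dict literal with the same entries
def pvCostDict : PySem.Dict Char Int :=
  PySem.Dict.mk [(' ', 0), ('!', 9), ('"', 6), ('#', 24), ('$', 29), ('%', 22), ('&', 24), ('\'', 3), ('(', 12),
    (')', 12), ('*', 17), ('+', 13), (',', 7), ('-', 7), ('.', 4), ('/', 10), ('0', 22), ('1', 19),
    ('2', 22), ('3', 23), ('4', 21), ('5', 27), ('6', 26), ('7', 16), ('8', 23), ('9', 26), (':', 8),
    (';', 11), ('<', 10), ('=', 14), ('>', 10), ('?', 15), ('@', 32), ('A', 24), ('B', 29), ('C', 20),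
    ('D', 26), ('E', 26), ('F', 20), ('G', 25), ('H', 25), ('I', 18), ('J', 18), ('K', 21), ('L', 16),
    ('M', 28), ('N', 25), ('O', 18), ('P', 23), ('Q', 31), ('R', 28), ('S', 25), ('T', 16), ('U', 23),
    ('V', 19), ('W', 26), ('X', 18), ('Y', 14), ('Z', 22), ('[', 18), ('\\', 10), (']', 18), ('^', 7),
    ('_', 8), ('`', 3), ('a', 23), ('b', 25), ('c', 17), ('d', 25), ('e', 23), ('f', 18), ('g', 30),
    ('h', 21), ('i', 15), ('j', 20), ('k', 21), ('l', 16), ('m', 22), ('n', 18), ('o', 20), ('p', 25),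
    ('q', 25), ('r', 13), ('s', 21), ('t', 17), ('u', 17), ('v', 13), ('w', 25), ('x', 13), ('y', 24),
    ('z', 19), ('{', 17), ('|', 12), ('}', 18), ('~', 9)]

def PrintingCosts_alt (Line : String) : Int :=
  ((Line.toList.foldl (fun d ch => d.insert ch (d.getD ch 0 + 1)) PySem.Dict.empty).items.map
    (fun p => p.2 * pvCostDict.getD p.1 23)).sum

-- ===== PRECONDITION & SPEC =====
def Spec_PrintingCosts (Line : String) (out : Int) : Prop := out = PrintingCosts_alt Line
instance (Line : String) (out : Int) : Decidable (Spec_PrintingCosts Line out) := by unfold Spec_PrintingCosts; infer_instance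

-- ===== CLAIM (what is proved, stated in full; the proofs are below) =====
def Claim_equal_PrintingCosts : Prop := ∀ (Line : String), Dom_PrintingCosts Line → Spec_PrintingCosts Line (PrintingCosts Line)

-- ===== LEMMAS AND PROOFS =====

-- the per-character toner weight both programs effectively use
def pvW (c : Char) : Int := pvCostDict.getD c 23

set_option maxRecDepth 4000 in
lemma pv_dict_eq : pvTonerDict = pvCostDict := by decide

set_option maxRecDepth 4000 in
lemma pv_nodup : (pvCostDict.items.map Prod.fst).Nodup := by decide

lemma pv_beq_comm (a b : Char) : (a == b) = (b == a) := by
  rw [Bool.eq_iff_iff]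
  simp only [beq_iff_eq]
  exact ⟨Eq.symm, Eq.symm⟩

lemma pv_fold_nomatch (addf : Char × Int → Int) (c : Char) :
    ∀ (l : List (Char × Int)), (∀ kv ∈ l, (c == kv.1) = false) → ∀ (a : Int × Int),
      l.foldl (fun a kv => if c == kv.1 then (a.1 + addf kv, a.2 - 1) else a) a = a := by
  intro l
  induction l with
  | nil => intro _ a; rfl
  | cons kv t ih =>
      intro h a
      simp only [List.foldl_cons]
      rw [if_neg (by simp [h kv (List.mem_cons_self ..)])]
      exact ih (fun kv' h' => h kv' (List.mem_cons_of_mem _ h')) a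

lemma pv_inner (addf : Char × Int → Int) (c : Char) :
    ∀ (l : List (Char × Int)), (l.map Prod.fst).Nodup → ∀ (s cnt : Int),
      l.foldl (fun a kv => if c == kv.1 then (a.1 + addf kv, a.2 - 1) else a) (s, cnt)
      = match l.find? (fun kv => c == kv.1) with
        | some kv => (s + addf kv, cnt - 1)
        | none => (s, cnt) := by
  intro l
  induction l with
  | nil => intro _ s cnt; rfl
  | cons kv t ih =>
      intro hnd s cnt
      by_cases hc : (c == kv.1) = true
      · have hce : c = kv.1 := eq_of_beq hc
        have hk : kv.1 ∉ t.map Prod.fst := by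
          simp only [List.map_cons, List.nodup_cons] at hnd
          exact hnd.1
        have hnomatch : ∀ kv' ∈ t, (c == kv'.1) = false := by
          intro kv' h'
          cases hb : (c == kv'.1) with
          | false => rfl
          | true =>
              exfalso
              have hce' : c = kv'.1 := eq_of_beq hb
              have hm : kv'.1 ∈ t.map Prod.fst := List.mem_map.mpr ⟨kv', h', rfl⟩
              rw [← hce', hce] at hm
              exact hk hm
        have hfind : List.find? (fun kv : Char × Int => c == kv.1) (kv :: t) = some kv := by
          simp [hc]
        simp only [List.foldl_cons]
        rw [if_pos hc, pv_fold_nomatch addf c t hnomatch, hfind]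
      · have hcf : (c == kv.1) = false := by
          cases hb : (c == kv.1) with
          | false => rfl
          | true => exact absurd hb hc
        have hfind : List.find? (fun kv : Char × Int => c == kv.1) (kv :: t)
            = List.find? (fun kv : Char × Int => c == kv.1) t := by
          simp [hcf]
        simp only [List.foldl_cons]
        rw [if_neg (by simp [hcf]), hfind]
        exact ih (by simp only [List.map_cons, List.nodup_cons] at hnd; exact hnd.2) s cnt

lemma pv_find_flip (c : Char) (l : List (Char × Int)) :
    l.find? (fun kv => c == kv.1) = l.find? (fun kv => kv.1 == c) := by
  congr 1
  funext kv
  exact pv_beq_comm ..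

lemma pv_char (c : Char) (s : Int) :
    pvStepA (s, (pvTonerDict.size : Int)) c = (s + pvW c, (pvTonerDict.size : Int)) := by
  unfold pvStepA
  rw [pv_dict_eq]
  rw [pv_inner _ c _ pv_nodup, pv_find_flip]
  cases hf : pvCostDict.items.find? (fun kv => kv.1 == c) with
  | none =>
      have hg : pvCostDict.get? c = none := by
        show Option.map (fun x => x.2) (pvCostDict.items.find? (fun p => p.1 == c)) = none
        rw [hf]
        rfl
      have hw : pvW c = 23 := by
        simp only [pvW, PySem.Dict.getD, hg, Option.getD_none]
      dsimp only
      rw [if_pos (beq_self_eq_true _), hw]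
  | some kv =>
      have hg : pvCostDict.get? c = some kv.2 := by
        show Option.map (fun x => x.2) (pvCostDict.items.find? (fun p => p.1 == c)) = some kv.2
        rw [hf]
        rfl
      have hk : kv.1 = c := by
        have h := List.find?_some hf
        simpa using h
      have hw : pvW c = kv.2 := by
        simp only [pvW, PySem.Dict.getD, hg, Option.getD_some]
      dsimp only
      rw [if_neg (by simp only [beq_iff_eq]; omega), hk, hg, hw]
      rfl

lemma pv_outer (cs : List Char) : ∀ s : Int,
    (cs.foldl pvStepA (s, (pvTonerDict.size : Int))).1 = s + (cs.map pvW).sum := by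
  induction cs with
  | nil =>
      intro s
      simp only [List.foldl_nil, List.map_nil, List.sum_nil]
      rw [add_zero]
  | cons c t ih =>
      intro s
      rw [List.foldl_cons, pv_char, ih]
      simp only [List.map_cons, List.sum_cons]
      ring

lemma pv_A (Line : String) : PrintingCosts Line = (Line.toList.map pvW).sum := by
  unfold PrintingCosts
  rw [show PySem.Str.len Line = ((Line.toList.length : Int)) from by simp,
      PySem.List.foldl_pyRange_zero_pyGetD' Line.toList ' ' pvStepA _,
      pv_outer]
  simp

lemma pv_sum_ite_zero (f : Char → Int) (x : Char) :
    ∀ (ks : List Char), x ∉ ks →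
      (ks.map (fun k => if k = x then f k else 0)).sum = 0 := by
  intro ks
  induction ks with
  | nil => intro _; rfl
  | cons k t ih =>
      intro h
      have hk : ¬ (k = x) := by intro he; exact h (by simp [he])
      simp only [List.map_cons, List.sum_cons, if_neg hk, zero_add]
      exact ih (fun h' => h (List.mem_cons_of_mem _ h'))

lemma pv_sum_ite (f : Char → Int) (x : Char) :
    ∀ (ks : List Char), ks.Nodup → x ∈ ks →
      (ks.map (fun k => if k = x then f k else 0)).sum = f x := by
  intro ks
  induction ks with
  | nil => intro _ h; cases h
  | cons k t ih =>
      intro hnd hmem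
      rcases List.mem_cons.mp hmem with he | ht
      · have hx : x ∉ t := by
          have hkt : k ∉ t := (List.nodup_cons.mp hnd).1
          rwa [he]
        simp only [List.map_cons, List.sum_cons, ← he, if_true]
        rw [pv_sum_ite_zero f x t hx]
        ring
      · have hk : ¬ (k = x) := by
          intro hkx
          exact (List.nodup_cons.mp hnd).1 (hkx ▸ ht)
        simp only [List.map_cons, List.sum_cons, if_neg hk, zero_add]
        exact ih (List.nodup_cons.mp hnd).2 ht

lemma pv_sum_counts (f : Char → Int) :
    ∀ (xs ks : List Char), ks.Nodup → (∀ x ∈ xs, x ∈ ks) →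
      (ks.map (fun k => (xs.count k : Int) * f k)).sum = (xs.map f).sum := by
  intro xs
  induction xs with
  | nil => intro ks _ _; simp
  | cons x t ih =>
      intro ks hnd hmem
      have hsplit : (ks.map (fun k => ((x :: t).count k : Int) * f k))
          = ks.map (fun k => (t.count k : Int) * f k + (if k = x then f k else 0)) := by
        apply List.map_congr_left
        intro k _
        have hc : (x :: t).count k = t.count k + (if x = k then 1 else 0) := by
          simp [List.count_cons, beq_iff_eq]
        rw [hc]
        push_cast
        by_cases he : k = x
        · simp only [he, if_true]
          ring
        · rw [if_neg (fun h => he h.symm), if_neg he]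
          ring
      rw [hsplit, List.sum_map_add, ih ks hnd (fun y hy => hmem y (List.mem_cons_of_mem _ hy)),
          pv_sum_ite f x ks hnd (hmem x (List.mem_cons_self ..))]
      simp [add_comm]

lemma pv_B (Line : String) : PrintingCosts_alt Line = (Line.toList.map pvW).sum := by
  unfold PrintingCosts_alt
  rw [PySem.Dict.foldl_insert_getD_add_one_eq_counter, PySem.Dict.items_counter, List.map_map]
  have hcomp : ((fun p : Char × Int => p.2 * pvCostDict.getD p.1 23) ∘
        (fun k => (k, ((Line.toList.count k : Int)))))
      = fun k => (Line.toList.count k : Int) * pvW k := by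
    funext k
    rfl
  rw [hcomp]
  exact pv_sum_counts pvW Line.toList (PySem.Set.ofList Line.toList)
    (PySem.Set.nodup_ofList _) (fun x hx => (PySem.Set.mem_ofList _ _).mpr hx)

-- ===== VERDICT (by name: the statement is the Claim_ definition above) =====
theorem PrintingCosts_spec : Claim_equal_PrintingCosts := by
  intro Line _
  unfold Spec_PrintingCosts
  rw [pv_A, pv_B]
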